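-- pv_equiv track=rewrite | github.com/quentin-auge/draw | lib/strokes.py | flatten_strokes
-- ===== SOURCE A (Python) =====
-- def flatten_strokes(strokes):
--     """
--     Flatten a list of strokes. Add stroke state in the process.
--
--     For each point j, the stroke state is a tuple (pj, qj, rj) where:
--       * pj=1 indicates the point is not the end of a stroke.
--       * qj=1 indicates the point is the end of a stroke (but not the end of the drawing).
--       * rj=1 indicates the point is the end of the drawing.
--     By construction, pj + qj + rj = 1
--
--     Input:
--         [
--             ((x1, x2, ..., xi-1, xi), (y1, y2, ..., yi-1, yi)),
--             ((xi+1, ...), (yi+1, ...)),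
--             ...,
--             ((..., xn-1, xn), (..., yn-1, yn))
--         ]
--
--     Output:
--         [
--             [x1,   y1,   1, 0, 0],
--             [x2,   y2,   1, 0, 0],
--             ...,
--             [xi-1, yi-1, 1, 0, 0],
--             [xi,   yi,   0, 1, 0]
--             [xi+1, yi+1, 1, 0, 0],
--             ...,
--             [xn-1, yn-1, 1, 0, 0]
--             [xn,   yn,   0, 0, 1]
--         ]
--     """
--
--     flat_strokes = []
--
--     for xs, ys in strokes:
--
--         for x, y in zip(xs, ys):
--             # Mark stroke in progress by default
--             flat_strokes.append([x, y, 1, 0, 0])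
--
--         # Mark end of stroke
--         x, y, *_ = flat_strokes[-1]
--         flat_strokes[-1] = [x, y, 0, 1, 0]
--
--     # Mark end of drawing
--     x, y, *_ = flat_strokes[-1]
--     flat_strokes[-1] = [x, y, 0, 0, 1]
--
--     return flat_strokes
-- ===== SOURCE B (Python) =====
-- def flatten_strokes(strokes):
--     # Reverse single pass: walk the strokes (and each stroke's points) back to
--     # front, deciding every point's flags at emission time -- the first point
--     # emitted overall gets the end-of-drawing flags, the first point emitted of
--     # each later-visited stroke gets the current "stroke end" flags -- then
--     # reverse the built list.  No row is ever rewritten.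
--     out = []
--     end_flags = [0, 0, 1]  # flags for the next stroke-final point emitted
--     for xs, ys in reversed(strokes):
--         pts = list(zip(xs, ys))
--         for j, (x, y) in enumerate(reversed(pts)):
--             out.append([x, y] + (end_flags if j == 0 else [1, 0, 0]))
--         if pts:
--             end_flags = [0, 1, 0]
--     out.reverse()
--     return out
-- ===== Notes on version B (the rewrite author's own statement) =====
-- stated objective: alternative
-- what changed: B walks strokes and points back to front in a single reverse pass, deciding each row's flags at emission time (first-emitted point gets end-of-drawing, each stroke's first-emitted point gets end-of-stroke) and reversing the result, instead of A's forward append-default-then-overwrite-flat[-1] mutation idiom.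
-- crash fix: On inputs whose first stroke contributes no zipped points (empty strokes list or an empty xs/ys in the first stroke) A raises IndexError at flat_strokes[-1]; B naturally returns the flattened rows of the remaining strokes (e.g. [] for []). — e.g. on flatten_strokes([]): A raises IndexError, B returns []
import Mathlib
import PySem

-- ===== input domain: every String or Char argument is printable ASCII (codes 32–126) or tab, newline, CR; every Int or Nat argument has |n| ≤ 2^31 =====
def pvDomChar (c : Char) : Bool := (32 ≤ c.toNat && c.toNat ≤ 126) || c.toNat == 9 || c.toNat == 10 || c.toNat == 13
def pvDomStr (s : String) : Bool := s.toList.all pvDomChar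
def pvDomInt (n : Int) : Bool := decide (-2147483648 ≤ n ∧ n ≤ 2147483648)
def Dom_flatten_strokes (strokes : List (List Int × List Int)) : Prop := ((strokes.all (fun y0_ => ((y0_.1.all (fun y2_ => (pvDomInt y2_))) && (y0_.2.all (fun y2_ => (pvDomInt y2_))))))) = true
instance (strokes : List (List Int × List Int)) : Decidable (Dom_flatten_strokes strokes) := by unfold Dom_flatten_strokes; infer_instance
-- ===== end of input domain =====

-- B replaces A's forward append-then-overwrite-flat[-1] pass by a single reverse pass that
-- decides each row's flags at emission time and reverses the result (alternative decomposition, same cost).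


-- ===== PORT A =====
-- "x, y, *_ = flat_strokes[-1]; flat_strokes[-1] = [x, y] + flags"; on an empty list
-- Python raises IndexError (pyGet? = none); that case is excluded by Pre_ below.
def pvMarkLastA (fs : List (List Int)) (flags : List Int) : List (List Int) :=
  match PySem.List.pyGet? fs (-1) with
  | some row => fs.take (fs.length - 1) ++ [[row.getD 0 0, row.getD 1 0] ++ flags]
  | none => fs   -- unreachable inside Pre_: Python raises IndexError here

def flatten_strokes (strokes : List (List Int × List Int)) : List (List Int) :=
  let fs := strokes.foldl (fun acc p =>
    let acc := (p.1.zip p.2).foldl (fun a xy => a ++ [[xy.1, xy.2, 1, 0, 0]]) acc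
    pvMarkLastA acc [0, 1, 0]) []
  pvMarkLastA fs [0, 0, 1]

-- ===== PORT B =====
-- reverse pass: state = (rows built back-to-front, flags for the next stroke-final point)
def flatten_strokes_alt (strokes : List (List Int × List Int)) : List (List Int) :=
  let st := strokes.reverse.foldl (fun (st : List (List Int) × List Int) p =>
    let pts := p.1.zip p.2
    let out := (PySem.List.enumerate pts.reverse 0).foldl
      (fun a ji => a ++ [[ji.2.1, ji.2.2] ++ (if ji.1 = 0 then st.2 else [1, 0, 0])]) st.1
    if pts ≠ [] then (out, [0, 1, 0]) else (out, st.2)) ([], [0, 0, 1])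
  st.1.reverse

-- ===== PRECONDITION & SPEC =====
-- Pre_ is exactly the inputs on which A returns: flat_strokes[-1] raises IndexError
-- iff the first stroke contributes no zipped points (or strokes is empty).
def Pre_flatten_strokes (strokes : List (List Int × List Int)) : Prop :=
  strokes ≠ [] ∧ strokes.headI.1 ≠ [] ∧ strokes.headI.2 ≠ []
instance (strokes : List (List Int × List Int)) : Decidable (Pre_flatten_strokes strokes) := by unfold Pre_flatten_strokes; infer_instance

def pvWitness_flatten_strokes : (List (List Int × List Int)) := [([1, 2], [3, 4]), ([5], [6])]

-- On inputs whose first stroke contributes no zipped points (empty strokes list or an empty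
-- xs/ys in the first stroke) A raises IndexError at flat_strokes[-1]; B returns the
-- flattened rows of the remaining strokes (e.g. [] for []).
def Raises_flatten_strokes (strokes : List (List Int × List Int)) : Prop :=
  strokes = [] ∨ strokes.headI.1 = [] ∨ strokes.headI.2 = []
instance (strokes : List (List Int × List Int)) : Decidable (Raises_flatten_strokes strokes) := by unfold Raises_flatten_strokes; infer_instance

def pvRaiseWitness_flatten_strokes : (List (List Int × List Int)) := []
def pvRaiseWitnessOut_flatten_strokes : List (List Int) := []

def Spec_flatten_strokes (strokes : List (List Int × List Int)) (out : List (List Int)) : Prop := out = flatten_strokes_alt strokes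
instance (strokes : List (List Int × List Int)) (out : List (List Int)) : Decidable (Spec_flatten_strokes strokes out) := by unfold Spec_flatten_strokes; infer_instance

-- ===== CLAIM (what is proved, stated in full; the proofs are below) =====
def Claim_equal_flatten_strokes : Prop := ∀ (strokes : List (List Int × List Int)), Dom_flatten_strokes strokes → Pre_flatten_strokes strokes → Spec_flatten_strokes strokes (flatten_strokes strokes)
def Claim_raises_flatten_strokes : Prop := (∀ (strokes : List (List Int × List Int)), Dom_flatten_strokes strokes → Raises_flatten_strokes strokes → ¬ Pre_flatten_strokes strokes) ∧ (Dom_flatten_strokes (pvRaiseWitness_flatten_strokes) ∧ Raises_flatten_strokes (pvRaiseWitness_flatten_strokes) ∧ flatten_strokes_alt (pvRaiseWitness_flatten_strokes) = pvRaiseWitnessOut_flatten_strokes)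

-- ===== LEMMAS AND PROOFS =====

-- raw rows of one stroke: zipped points, default "stroke in progress" flags
def pvRaw (p : List Int × List Int) : List (List Int) :=
  (p.1.zip p.2).map (fun xy => [xy.1, xy.2, 1, 0, 0])

-- mark the last row of a list with the given flags (no-op on [])
def pvMarkL : List (List Int) → List Int → List (List Int)
  | [], _ => []
  | [r], f => [r.take 2 ++ f]
  | r :: s :: rs, f => r :: pvMarkL (s :: rs) f

def pvGmark (p : List Int × List Int) : List (List Int) := pvMarkL (pvRaw p) [0, 1, 0]

def pvInv (fs : List (List Int)) : Prop :=
  (∃ pre x y, fs = pre ++ [[x, y, 0, 1, 0]]) ∧ ∀ r ∈ fs, r.length = 5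

-- mark the first row of a list with the given flags (no-op on [])
def pvMarkF : List (List Int) → List Int → List (List Int)
  | [], _ => []
  | r :: t, f => (r.take 2 ++ f) :: t

-- rows contributed by a reversed stroke list, in final (forward) order
def pvR : List (List Int × List Int) → List Int → List (List Int)
  | [], _ => []
  | p :: rest, f =>
    pvR rest (if p.1.zip p.2 = [] then f else [0, 1, 0]) ++ pvMarkL (pvRaw p) f

-- rows built back-to-front by B's outer fold, plus the running flags
def pvG : List (List Int × List Int) → List Int → List (List Int)
  | [], _ => []
  | p :: rest, f =>
    (pvMarkL (pvRaw p) f).reverse ++ pvG rest (if p.1.zip p.2 = [] then f else [0, 1, 0])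

def pvF : List (List Int × List Int) → List Int → List Int
  | [], f => f
  | p :: rest, f => pvF rest (if p.1.zip p.2 = [] then f else [0, 1, 0])

lemma pv_foldl_app {α : Type} (f : α → List Int) (l : List α) (acc : List (List Int)) :
    l.foldl (fun a x => a ++ [f x]) acc = acc ++ l.map f := by
  induction l generalizing acc with
  | nil => simp
  | cons x xs ih => simp [ih]

lemma pv_raw_length (p : List Int × List Int) :
    (pvRaw p).length = min p.1.length p.2.length := by simp [pvRaw]

lemma pv_raw_rows5 (p : List Int × List Int) : ∀ r ∈ pvRaw p, r.length = 5 := by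
  intro r hr; simp [pvRaw] at hr; obtain ⟨x, y, _, rfl⟩ := hr; rfl

lemma pv_markL_cons (r : List Int) (l : List (List Int)) (f : List Int) (h : l ≠ []) :
    pvMarkL (r :: l) f = r :: pvMarkL l f := by
  cases l with
  | nil => exact absurd rfl h
  | cons s rs => rfl

lemma pv_markL_append (acc rs : List (List Int)) (f : List Int) (h : rs ≠ []) :
    pvMarkL (acc ++ rs) f = acc ++ pvMarkL rs f := by
  induction acc with
  | nil => simp
  | cons a t ih =>
    have ht : t ++ rs ≠ [] := by
      intro hc
      rcases List.append_eq_nil_iff.mp hc with ⟨_, h2⟩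
      exact h h2
    rw [List.cons_append, pv_markL_cons _ _ _ ht, ih, List.cons_append]

lemma pv_markL_length (rs : List (List Int)) (f : List Int) :
    (pvMarkL rs f).length = rs.length := by
  induction rs with
  | nil => rfl
  | cons r t ih =>
    cases t with
    | nil => rfl
    | cons s rs' => rw [pv_markL_cons _ _ _ (by simp)]; simpa using ih

lemma pv_markLastA_cons2 (r s : List Int) (rs : List (List Int)) (f : List Int) :
    pvMarkLastA (r :: s :: rs) f = r :: pvMarkLastA (s :: rs) f := by
  unfold pvMarkLastA
  rw [PySem.List.pyGet?_neg_one, PySem.List.pyGet?_neg_one, List.getLast?_cons_cons]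
  obtain ⟨w, hw⟩ : ∃ w, (s :: rs).getLast? = some w :=
    Option.isSome_iff_exists.mp (List.getLast?_isSome.mpr (by simp))
  rw [hw]
  simp [List.take_succ_cons]

lemma pv_markLastA_eq (fs : List (List Int)) (f : List Int) (h : fs ≠ [])
    (h5 : ∀ r ∈ fs, r.length = 5) :
    pvMarkLastA fs f = pvMarkL fs f := by
  induction fs with
  | nil => exact absurd rfl h
  | cons r t ih =>
    cases t with
    | nil =>
      have h5r := h5 r (by simp)
      rcases r with _ | ⟨x, r⟩
      · simp at h5r
      rcases r with _ | ⟨y, r⟩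
      · simp at h5r
      simp [pvMarkLastA, PySem.List.pyGet?_neg_one, pvMarkL, List.getD]
    | cons s rs =>
      rw [pv_markLastA_cons2, pv_markL_cons _ _ _ (by simp),
        ih (by simp) (fun q hq => h5 q (List.mem_cons_of_mem _ hq))]

lemma pv_markL_inv (rs : List (List Int)) (h : rs ≠ []) (h5 : ∀ r ∈ rs, r.length = 5) :
    pvInv (pvMarkL rs [0, 1, 0]) := by
  induction rs with
  | nil => exact absurd rfl h
  | cons r t ih =>
    cases t with
    | nil =>
      have h5r := h5 r (by simp)
      rcases r with _ | ⟨x, r⟩; · simp at h5r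
      rcases r with _ | ⟨y, r⟩; · simp at h5r
      exact ⟨⟨[], x, y, by simp [pvMarkL]⟩, by simp [pvMarkL]⟩
    | cons s rs' =>
      obtain ⟨⟨pre, x, y, heq⟩, hrows⟩ :=
        ih (by simp) (fun q hq => h5 q (List.mem_cons_of_mem _ hq))
      refine ⟨⟨r :: pre, x, y, ?_⟩, ?_⟩
      · rw [pv_markL_cons _ _ _ (by simp), heq]; rfl
      · intro q hq
        rw [pv_markL_cons _ _ _ (by simp)] at hq
        rcases List.mem_cons.mp hq with rfl | hq
        · exact h5 q (by simp)
        · exact hrows q hq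

lemma pv_inv_append (a b : List (List Int)) (ha : pvInv a) (hb : pvInv b) :
    pvInv (a ++ b) := by
  obtain ⟨⟨pre, x, y, heq⟩, hb5⟩ := hb
  exact ⟨⟨a ++ pre, x, y, by rw [heq, List.append_assoc]⟩,
    fun r hr => (List.mem_append.mp hr).elim (ha.2 r) (hb5 r)⟩

lemma pv_markL_fixed (acc : List (List Int)) (hi : pvInv acc) :
    pvMarkL acc [0, 1, 0] = acc := by
  obtain ⟨⟨pre, x, y, rfl⟩, _⟩ := hi
  rw [pv_markL_append _ _ _ (by simp)]
  simp [pvMarkL]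

lemma pv_A_step (acc : List (List Int)) (p : List Int × List Int) (hi : pvInv acc) :
    pvMarkLastA ((p.1.zip p.2).foldl (fun a xy => a ++ [[xy.1, xy.2, 1, 0, 0]]) acc) [0, 1, 0]
      = acc ++ pvGmark p := by
  rw [pv_foldl_app (fun xy : Int × Int => [xy.1, xy.2, 1, 0, 0])]
  by_cases hr : pvRaw p = []
  · rw [show (p.1.zip p.2).map (fun xy => [xy.1, xy.2, 1, 0, 0]) = pvRaw p from rfl, hr]
    simp only [List.append_nil]
    obtain ⟨⟨pre, x, y, heq⟩, h5⟩ := hi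
    rw [pv_markLastA_eq acc _ (by rw [heq]; simp) h5, pv_markL_fixed acc ⟨⟨pre, x, y, heq⟩, h5⟩,
      pvGmark, hr]
    simp [pvMarkL]
  · rw [show (p.1.zip p.2).map (fun xy => [xy.1, xy.2, 1, 0, 0]) = pvRaw p from rfl]
    rw [pv_markLastA_eq _ _ (by intro hc; rcases List.append_eq_nil_iff.mp hc with ⟨_, h2⟩; exact hr h2)
      (fun q hq => (List.mem_append.mp hq).elim (hi.2 q) (pv_raw_rows5 p q)),
      pv_markL_append _ _ _ hr]
    rfl

lemma pv_A_fold (strokes : List (List Int × List Int)) :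
    ∀ acc : List (List Int), pvInv acc →
    strokes.foldl (fun acc p =>
        pvMarkLastA ((p.1.zip p.2).foldl (fun a xy => a ++ [[xy.1, xy.2, 1, 0, 0]]) acc) [0, 1, 0]) acc
      = acc ++ strokes.flatMap pvGmark := by
  induction strokes with
  | nil => intro acc _; simp
  | cons p rest ih =>
    intro acc hinv
    rw [List.foldl_cons, pv_A_step acc p hinv]
    by_cases hr : pvRaw p = []
    · have hg : pvGmark p = [] := by rw [pvGmark, hr]; rfl
      rw [ih _ (by rw [hg, List.append_nil]; exact hinv)]
      simp [hg]
    · have hinv2 : pvInv (acc ++ pvGmark p) :=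
        pv_inv_append _ _ hinv (pv_markL_inv _ hr (pv_raw_rows5 p))
      rw [ih _ hinv2]
      simp

lemma pv_inv_flatMap (rest : List (List Int × List Int)) :
    ∀ acc : List (List Int), pvInv acc → pvInv (acc ++ rest.flatMap pvGmark) := by
  induction rest with
  | nil => intro acc h; simpa using h
  | cons q rest ih =>
    intro acc h
    rw [show (q :: rest).flatMap pvGmark = pvGmark q ++ rest.flatMap pvGmark from by simp,
      ← List.append_assoc]
    by_cases hq : pvRaw q = []
    · have : pvGmark q = [] := by rw [pvGmark, hq]; rfl
      rw [this, List.append_nil]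
      exact ih acc h
    · exact ih _ (pv_inv_append _ _ h (pv_markL_inv _ hq (pv_raw_rows5 q)))

-- B-side lemmas ------------------------------------------------------------

lemma pv_flatMap_nil_or_inv (S : List (List Int × List Int)) :
    S.flatMap pvGmark = [] ∨ pvInv (S.flatMap pvGmark) := by
  induction S with
  | nil => left; rfl
  | cons q rest ih =>
    by_cases hq : pvRaw q = []
    · have hg : pvGmark q = [] := by rw [pvGmark, hq]; rfl
      simpa [hg] using ih
    · right
      have hinvq : pvInv (pvGmark q) := pv_markL_inv _ hq (pv_raw_rows5 q)
      rw [show (q :: rest).flatMap pvGmark = pvGmark q ++ rest.flatMap pvGmark from by simp]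
      rcases ih with h | h
      · rw [h, List.append_nil]; exact hinvq
      · exact pv_inv_append _ _ hinvq h

lemma pv_markL_fix_flatMap (S : List (List Int × List Int)) :
    pvMarkL (S.flatMap pvGmark) [0, 1, 0] = S.flatMap pvGmark := by
  rcases pv_flatMap_nil_or_inv S with h | h
  · rw [h]; rfl
  · exact pv_markL_fixed _ h

-- re-marking the last row overwrites the first mark (rows have ≥ 2 coordinates)
lemma pv_markL_markL (rs : List (List Int)) (a b : List Int)
    (h2 : ∀ r ∈ rs, 2 ≤ r.length) :
    pvMarkL (pvMarkL rs a) b = pvMarkL rs b := by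
  induction rs with
  | nil => rfl
  | cons r t ih =>
    cases t with
    | nil =>
      have hr := h2 r (by simp)
      have htake : (r.take 2 ++ a).take 2 = r.take 2 := by
        rw [List.take_append]
        simp [Nat.min_eq_left hr]
      simp [pvMarkL, htake]
    | cons s rs' =>
      have hne : pvMarkL (s :: rs') a ≠ [] := by
        rw [← List.length_pos_iff, pv_markL_length]; simp
      rw [pv_markL_cons r (s :: rs') a (by simp), pv_markL_cons r _ b hne,
        pv_markL_cons r (s :: rs') b (by simp),
        ih (fun q hq => h2 q (List.mem_cons_of_mem _ hq))]

-- B's inner fold over enumerate(reversed(pts)) builds the first-marked reversed raw rows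
lemma pv_inner_tail (q : List (Int × Int)) (f : List Int) :
    ∀ s : Int, 1 ≤ s →
    (PySem.List.enumerate q s).map
        (fun ji => [ji.2.1, ji.2.2] ++ (if ji.1 = 0 then f else [1, 0, 0]))
      = q.map (fun xy => [xy.1, xy.2, 1, 0, 0]) := by
  induction q with
  | nil => intro s _; simp [PySem.List.enumerate_nil]
  | cons x t ih =>
    intro s hs
    rw [PySem.List.enumerate_cons, List.map_cons, List.map_cons,
      if_neg (by omega), ih (s + 1) (by omega)]
    rfl

lemma pv_inner (q : List (Int × Int)) (f : List Int) :
    (PySem.List.enumerate q 0).map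
        (fun ji => [ji.2.1, ji.2.2] ++ (if ji.1 = 0 then f else [1, 0, 0]))
      = pvMarkF (q.map (fun xy => [xy.1, xy.2, 1, 0, 0])) f := by
  cases q with
  | nil => rfl
  | cons x t =>
    rw [PySem.List.enumerate_cons, List.map_cons, if_pos rfl,
      pv_inner_tail t f (0 + 1) (by omega)]
    rfl

-- marking the first row of the reverse = reverse of marking the last row
lemma pv_markF_reverse (l : List (List Int)) (f : List Int) :
    pvMarkF l.reverse f = (pvMarkL l f).reverse := by
  rcases List.eq_nil_or_concat l with rfl | ⟨init, a, rfl⟩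
  · rfl
  · rw [List.concat_eq_append, List.reverse_append, pv_markL_append _ _ _ (by simp)]
    simp [pvMarkF, pvMarkL]

lemma pv_B_fold (L : List (List Int × List Int)) :
    ∀ (acc : List (List Int)) (f : List Int),
    L.foldl (fun (st : List (List Int) × List Int) p =>
        let pts := p.1.zip p.2
        let out := (PySem.List.enumerate pts.reverse 0).foldl
          (fun a ji => a ++ [[ji.2.1, ji.2.2] ++ (if ji.1 = 0 then st.2 else [1, 0, 0])]) st.1
        if pts ≠ [] then (out, [0, 1, 0]) else (out, st.2)) (acc, f)
      = (acc ++ pvG L f, pvF L f) := by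
  induction L with
  | nil => intro acc f; simp [pvG, pvF]
  | cons p rest ih =>
    intro acc f
    rw [List.foldl_cons]
    have hout : (PySem.List.enumerate (p.1.zip p.2).reverse 0).foldl
        (fun a ji => a ++ [[ji.2.1, ji.2.2] ++ (if ji.1 = 0 then f else [1, 0, 0])]) acc
        = acc ++ (pvMarkL (pvRaw p) f).reverse := by
      rw [pv_foldl_app (fun ji : Int × Int × Int =>
          [ji.2.1, ji.2.2] ++ (if ji.1 = 0 then f else [1, 0, 0])),
        pv_inner, List.map_reverse, pv_markF_reverse]
      rfl
    by_cases hz : p.1.zip p.2 = []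
    · have hraw : pvRaw p = [] := by rw [pvRaw, hz]; rfl
      simp only [hz, ne_eq, not_true_eq_false, if_false]
      rw [show ((PySem.List.enumerate ([] : List (Int × Int)).reverse 0).foldl
          (fun a ji => a ++ [[ji.2.1, ji.2.2] ++ (if ji.1 = 0 then f else [1, 0, 0])]) acc) = acc
          from rfl]
      rw [ih acc f]
      rw [show pvG (p :: rest) f
          = (pvMarkL (pvRaw p) f).reverse ++ pvG rest (if p.1.zip p.2 = [] then f else [0, 1, 0])
          from rfl,
        show pvF (p :: rest) f = pvF rest (if p.1.zip p.2 = [] then f else [0, 1, 0]) from rfl,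
        if_pos hz, hraw]
      simp [pvMarkL]
    · simp only [hz, ne_eq, not_false_eq_true, if_true]
      rw [hout, ih]
      rw [show pvG (p :: rest) f
          = (pvMarkL (pvRaw p) f).reverse ++ pvG rest (if p.1.zip p.2 = [] then f else [0, 1, 0])
          from rfl,
        show pvF (p :: rest) f = pvF rest (if p.1.zip p.2 = [] then f else [0, 1, 0]) from rfl,
        if_neg hz]
      simp

lemma pv_G_reverse (L : List (List Int × List Int)) :
    ∀ f, (pvG L f).reverse = pvR L f := by
  induction L with
  | nil => intro f; rfl
  | cons p rest ih =>
    intro f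
    rw [show pvG (p :: rest) f
        = (pvMarkL (pvRaw p) f).reverse ++ pvG rest (if p.1.zip p.2 = [] then f else [0, 1, 0])
        from rfl,
      List.reverse_append, List.reverse_reverse, ih]
    rfl

lemma pv_R_eq (L : List (List Int × List Int)) :
    ∀ f, pvR L f = pvMarkL (L.reverse.flatMap pvGmark) f := by
  induction L with
  | nil => intro f; rfl
  | cons p rest ih =>
    intro f
    rw [show pvR (p :: rest) f
        = pvR rest (if p.1.zip p.2 = [] then f else [0, 1, 0]) ++ pvMarkL (pvRaw p) f from rfl]
    rw [show (p :: rest).reverse = rest.reverse ++ [p] from by simp,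
      List.flatMap_append]
    by_cases hz : p.1.zip p.2 = []
    · have hraw : pvRaw p = [] := by rw [pvRaw, hz]; rfl
      have hg : pvGmark p = [] := by rw [pvGmark, hraw]; rfl
      rw [if_pos hz, ih f, hraw]
      simp [pvMarkL, hg]
    · have hraw : pvRaw p ≠ [] := by
        rw [pvRaw]; simpa using hz
      have hg : pvGmark p ≠ [] := by
        rw [pvGmark, ← List.length_pos_iff, pv_markL_length, List.length_pos_iff]
        exact hraw
      rw [if_neg hz, ih, pv_markL_fix_flatMap,
        show [p].flatMap pvGmark = pvGmark p from by simp,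
        pv_markL_append _ _ _ hg, pvGmark,
        pv_markL_markL _ _ _ (fun r hr => by rw [pv_raw_rows5 p r hr]; omega)]

-- ===== VERDICT (by name: the statements are the Claim_ definitions above) =====
theorem flatten_strokes_spec : Claim_equal_flatten_strokes := by
  intro strokes _ hpre
  unfold Spec_flatten_strokes
  obtain ⟨hne, h1, h2⟩ := hpre
  rcases strokes with _ | ⟨p, rest⟩
  · exact absurd rfl hne
  simp only [List.headI] at h1 h2
  have hraw : pvRaw p ≠ [] := by
    intro hc
    have := pv_raw_length p
    rw [hc] at this
    rcases p with ⟨xs, ys⟩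
    rcases xs with _ | ⟨x, xs⟩; · exact h1 rfl
    rcases ys with _ | ⟨y, ys⟩; · exact h2 rfl
    simp [Nat.succ_min_succ] at this
  -- A side
  have hA : flatten_strokes (p :: rest) = pvMarkL ((p :: rest).flatMap pvGmark) [0, 0, 1] := by
    unfold flatten_strokes
    rw [List.foldl_cons]
    have hstep : pvMarkLastA ((p.1.zip p.2).foldl
        (fun a xy => a ++ [[xy.1, xy.2, 1, 0, 0]]) []) [0, 1, 0] = pvGmark p := by
      rw [pv_foldl_app (fun xy : Int × Int => [xy.1, xy.2, 1, 0, 0]), List.nil_append]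
      rw [show (p.1.zip p.2).map (fun xy => [xy.1, xy.2, 1, 0, 0]) = pvRaw p from rfl]
      rw [pv_markLastA_eq _ _ hraw (pv_raw_rows5 p)]
      rfl
    rw [hstep, pv_A_fold rest (pvGmark p) (pv_markL_inv _ hraw (pv_raw_rows5 p))]
    have hinv : pvInv (pvGmark p ++ rest.flatMap pvGmark) :=
      pv_inv_flatMap rest _ (pv_markL_inv _ hraw (pv_raw_rows5 p))
    rw [pv_markLastA_eq _ _ (by obtain ⟨⟨pre, x, y, heq⟩, _⟩ := hinv; rw [heq]; simp) hinv.2]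
    simp
  -- B side
  have hB : flatten_strokes_alt (p :: rest) = pvMarkL ((p :: rest).flatMap pvGmark) [0, 0, 1] := by
    unfold flatten_strokes_alt
    rw [pv_B_fold (p :: rest).reverse [] [0, 0, 1]]
    simp only [List.nil_append]
    rw [pv_G_reverse, pv_R_eq, List.reverse_reverse]
  rw [hA, hB]

@[simp]
theorem flatten_strokes_raises : Claim_raises_flatten_strokes := by
  unfold Claim_raises_flatten_strokes
  refine ⟨?_, by decide⟩
  intro strokes _ hr hpre
  rcases hr with h | h | h
  · exact hpre.1 h
  · exact hpre.2.1 h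
  · exact hpre.2.2 h
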